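-- pv_equiv track=rewrite | github.com/tonyyo/- | Python算法指南/49_子矩阵和为0_巧用和矩阵和循环_背.py | submatrixSum
-- ===== SOURCE A (Python) =====
-- def submatrixSum(matrix):  # 该方法很巧妙, 但是只能找到一种
--     row = len(matrix)
--     col = len(matrix[0])
--     prefixSum = [[0] * (col + 1) for _ in range(row + 1)]
--     ans = []
--     for i in range(1, row + 1):
--         for j in range(1, col + 1):
--             prefixSum[i][j] = prefixSum[i - 1][j] + prefixSum[i][j - 1] - prefixSum[i - 1][j - 1] + matrix[i - 1][
--                 j - 1]
--             for x in range(i):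
--                 for y in range(j):
--                     if prefixSum[i][j] - (prefixSum[i][y] + prefixSum[x][j]) + prefixSum[x][y] == 0:
--                         ans.append("" + str(x) + str(y) + str(i - 1) + str(j - 1))  # 存多种情况, 用字符串
--     return ans
-- ===== SOURCE B (Python) =====
-- def submatrixSum(matrix):
--     # Fix the top row x, sweep the bottom row downward while maintaining the
--     # band's column sums; a hash of the band's 1D prefix sums yields every
--     # zero-sum column range in O(col) per band; sort the hits to A's order.
--     row = len(matrix)
--     col = len(matrix[0])
--     hits = []
--     for x in range(row):
--         colsum = [0] * col
--         for i in range(x + 1, row + 1):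
--             r = matrix[i - 1]
--             for c in range(col):
--                 colsum[c] += r[c]
--             pref = [0] * (col + 1)
--             for c in range(col):
--                 pref[c + 1] = pref[c] + colsum[c]
--             seen = {}
--             for j in range(col + 1):
--                 for y in seen.get(pref[j], []):
--                     hits.append((i, j, x, y))
--                 seen.setdefault(pref[j], []).append(j)
--     hits.sort()
--     return [str(x) + str(y) + str(i - 1) + str(j - 1) for (i, j, x, y) in hits]
-- ===== Notes on version B (the rewrite author's own statement) =====
-- stated objective: faster
-- what changed: A checks every (x,y) pair for each cell of a 2D prefix table (four nested loops); B fixes the top row, sweeps the bottom row while maintaining band column sums, hash-indexes the band's 1D prefix sums to emit every zero-sum column range directly, and sorts the collected hits into A's emission order.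
import Mathlib
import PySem

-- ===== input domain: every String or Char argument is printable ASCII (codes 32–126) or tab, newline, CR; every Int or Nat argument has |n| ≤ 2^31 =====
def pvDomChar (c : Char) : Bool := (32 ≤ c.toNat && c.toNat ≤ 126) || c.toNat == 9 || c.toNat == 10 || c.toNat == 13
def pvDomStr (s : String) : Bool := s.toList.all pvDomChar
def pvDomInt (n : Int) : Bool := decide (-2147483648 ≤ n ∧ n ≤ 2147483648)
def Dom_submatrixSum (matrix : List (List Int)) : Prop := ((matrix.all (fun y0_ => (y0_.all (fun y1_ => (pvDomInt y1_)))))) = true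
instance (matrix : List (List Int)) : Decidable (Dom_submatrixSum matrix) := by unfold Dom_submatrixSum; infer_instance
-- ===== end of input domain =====

-- B replaces A's quadruple nested scan over a 2D prefix table by a row-pair sweep with
-- hashed 1D band prefix sums (zero-sum column ranges per band), sorting hits into A's order.


-- ===== PORT A =====
-- str(x) + str(y) + str(i) + str(j), built from PySem.Int.toChars (exact for str(int))
def pvFmt (x y i j : Int) : String :=
  String.mk (PySem.Int.toChars x ++ PySem.Int.toChars y ++ PySem.Int.toChars i ++ PySem.Int.toChars j)

-- m[a][b] (total form; all reads in both ports are in range under Pre_)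
def pvGet2 (m : List (List Int)) (a b : Int) : Int :=
  PySem.List.pyGetD (PySem.List.pyGetD m a []) b 0

def submatrixSum (matrix : List (List Int)) : List String :=
  let row := PySem.List.len matrix
  let col := PySem.List.len (PySem.List.pyGetD matrix 0 [])
  let prefixSum : List (List Int) :=
    (PySem.List.pyRange 0 (row + 1) 1).map (fun _ => PySem.List.pyRepeat [0] (col + 1))
  let res :=
    (PySem.List.pyRange 1 (row + 1) 1).foldl (fun (st : List (List Int) × List String) i =>
      (PySem.List.pyRange 1 (col + 1) 1).foldl (fun (st : List (List Int) × List String) j =>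
        let v := pvGet2 st.1 (i - 1) j + pvGet2 st.1 i (j - 1) - pvGet2 st.1 (i - 1) (j - 1)
                   + pvGet2 matrix (i - 1) (j - 1)
        let P := PySem.List.pySetD st.1 i (PySem.List.pySetD (PySem.List.pyGetD st.1 i []) j v)
        let ans := (PySem.List.pyRange 0 i 1).foldl (fun ans x =>
          (PySem.List.pyRange 0 j 1).foldl (fun ans y =>
            if pvGet2 P i j - (pvGet2 P i y + pvGet2 P x j) + pvGet2 P x y = 0 then
              ans ++ [pvFmt x y (i - 1) (j - 1)]
            else ans) ans) st.2
        (P, ans)) st) (prefixSum, [])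
  res.2

-- ===== PORT B =====
def submatrixSum_alt (matrix : List (List Int)) : List String :=
  let row := PySem.List.len matrix
  let col := PySem.List.len (PySem.List.pyGetD matrix 0 [])
  let hits :=
    (PySem.List.pyRange 0 row 1).foldl (fun (hits : List (Int × Int × Int × Int)) x =>
      ((PySem.List.pyRange (x + 1) (row + 1) 1).foldl
        (fun (st : List Int × List (Int × Int × Int × Int)) i =>
          let r := PySem.List.pyGetD matrix (i - 1) []
          let colsum := (PySem.List.pyRange 0 col 1).foldl
            (fun cs c => PySem.List.pySetD cs c (PySem.List.pyGetD cs c 0 + PySem.List.pyGetD r c 0)) st.1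
          let pref := (PySem.List.pyRange 0 col 1).foldl
            (fun pf c => PySem.List.pySetD pf (c + 1) (PySem.List.pyGetD pf c 0 + PySem.List.pyGetD colsum c 0))
            (PySem.List.pyRepeat [0] (col + 1))
          let inner := (PySem.List.pyRange 0 (col + 1) 1).foldl
            (fun (dh : PySem.Dict Int (List Int) × List (Int × Int × Int × Int)) j =>
              let p := PySem.List.pyGetD pref j 0
              (dh.1.modify p [] (fun l => l ++ [j]),
               dh.2 ++ (dh.1.getD p []).map (fun y => (i, j, x, y))))
            (PySem.Dict.empty, st.2)
          (colsum, inner.2))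
        (PySem.List.pyRepeat [0] col, hits)).2) []
  (PySem.List.sorted hits (fun t => toLex (t.1, toLex (t.2.1, toLex (t.2.2.1, t.2.2.2)))) false).map
    (fun t => pvFmt t.2.2.1 t.2.2.2 (t.1 - 1) (t.2.1 - 1))

-- ===== PRECONDITION & SPEC =====
-- Python A raises IndexError on an empty matrix (matrix[0]) and whenever some row is
-- shorter than the first row (matrix[i-1][j-1]); Pre_ excludes exactly those inputs.
def Pre_submatrixSum (matrix : List (List Int)) : Prop :=
  matrix ≠ [] ∧ ∀ r ∈ matrix, (matrix.headD []).length ≤ r.length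
instance (matrix : List (List Int)) : Decidable (Pre_submatrixSum matrix) := by
  unfold Pre_submatrixSum; infer_instance

def pvWitness_submatrixSum : List (List Int) := [[0, 1], [-1, 0]]

def Spec_submatrixSum (matrix : List (List Int)) (out : List String) : Prop := out = submatrixSum_alt matrix
instance (matrix : List (List Int)) (out : List String) : Decidable (Spec_submatrixSum matrix out) := by
  unfold Spec_submatrixSum; infer_instance

-- ===== CLAIM (what is proved, stated in full; the proofs are below) =====
def Claim_equal_submatrixSum : Prop := ∀ (matrix : List (List Int)), Dom_submatrixSum matrix → Pre_submatrixSum matrix → Spec_submatrixSum matrix (submatrixSum matrix)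

-- ===== LEMMAS AND PROOFS =====

def pvPre2 (m : List (List Int)) (a b : Nat) : Int :=
  ((m.take a).map (fun r => (r.take b).sum)).sum

def pvCondB (m : List (List Int)) (i j x y : Nat) : Bool :=
  pvPre2 m i j - (pvPre2 m i y + pvPre2 m x j) + pvPre2 m x y == 0

def pvFmt4 (t : Int × Int × Int × Int) : String :=
  pvFmt t.2.2.1 t.2.2.2 (t.1 - 1) (t.2.1 - 1)

def pvKey (t : Int × Int × Int × Int) : Lex (Int × Lex (Int × Lex (Int × Int))) :=
  toLex (t.1, toLex (t.2.1, toLex (t.2.2.1, t.2.2.2)))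

def pvCell (m : List (List Int)) (i0 j0 : Nat) : List (Int × Int × Int × Int) :=
  (List.range (i0+1)).flatMap fun x =>
    ((List.range (j0+1)).filter (fun y => pvCondB m (i0+1) (j0+1) x y)).map fun (y : Nat) =>
      (((i0+1 : Nat) : Int), ((j0+1 : Nat) : Int), ((x : Nat) : Int), ((y : Nat) : Int))

def pvLq (m : List (List Int)) : List (Int × Int × Int × Int) :=
  (List.range m.length).flatMap fun i0 =>
    (List.range (m.headD []).length).flatMap fun j0 => pvCell m i0 j0

def pvTab (m : List (List Int)) (i j : Nat) : List (List Int) :=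
  (List.range (m.length+1)).map fun a =>
    (List.range ((m.headD []).length+1)).map fun b =>
      if a < i ∨ (a = i ∧ b ≤ j) then pvPre2 m a b else 0

def pvSeg (m : List (List Int)) (x i d : Nat) : Int :=
  ((List.range (i-x)).map fun k => (m.getD (x+k) []).getD d 0).sum

def pvPS (h : Nat → Int) (d : Nat) : Int := ((List.range d).map h).sum

def pvBand (m : List (List Int)) (x i : Nat) : List (Int × Int × Int × Int) :=
  (List.range ((m.headD []).length + 1)).flatMap fun j =>
    ((List.range j).filter fun y => pvCondB m i j x y).map fun (y : Nat) =>
      ((i : Int), (j : Int), ((x : Nat) : Int), ((y : Nat) : Int))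

def pvHB (m : List (List Int)) : List (Int × Int × Int × Int) :=
  (List.range m.length).flatMap fun x =>
    (List.range (m.length - x)).flatMap fun k => pvBand m x (x+k+1)


theorem pvHead' (m : List (List Int)) : PySem.List.pyGetD m 0 [] = m.headD [] := by
  cases m <;> simp [PySem.List.pyGetD_zero]

theorem pvGetDMapRange {α : Type} (f : Nat → α) (N t : Nat) (d : α) (ht : t < N) :
    ((List.range N).map f).getD t d = f t := by
  rw [List.getD_eq_getElem?_getD]
  simp [ht]

theorem pvSetMapRange {α : Type} (f : Nat → α) (N t : Nat) (v : α) (ht : t < N) :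
    ((List.range N).map f).set t v = (List.range N).map (fun d => if d = t then v else f d) := by
  apply List.ext_getElem
  · simp
  · intro i h1 h2
    simp only [List.getElem_set, List.getElem_map, List.getElem_range]
    split_ifs <;> first | rfl | omega

theorem pvRangeNat (t : ℕ) :
    PySem.List.pyRange 0 (t : Int) 1 = (List.range t).map (Nat.cast : ℕ → ℤ) := by
  rw [PySem.List.pyRange_one]
  apply List.ext_getElem
  · simp
  · intro i h1 h2
    simp

theorem pvGetDMem (m : List (List Int)) (i0 : ℕ) (h : i0 < m.length) : m.getD i0 [] ∈ m := by
  rw [List.getD_eq_getElem?_getD, List.getElem?_eq_getElem h]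
  exact List.getElem_mem h

-- one cell of A's double loop

theorem pvPermFlatMapAppend {α γ : Type} (l : List α) (f h : α → List γ) :
    (l.flatMap fun a => f a ++ h a).Perm (l.flatMap f ++ l.flatMap h) := by
  induction l with
  | nil => simp
  | cons a t ih =>
    simp only [List.flatMap_cons]
    refine ((ih.append_left (f a ++ h a)).trans ?_)
    simp only [List.append_assoc]
    exact List.Perm.append_left _ (List.perm_append_comm_assoc (h a) (t.flatMap f) (t.flatMap h))

theorem pvPermRect {γ : Type} (l1 l2 : List Nat) (g : Nat → Nat → List γ) :
    (l1.flatMap fun a => l2.flatMap fun b => g a b).Perm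
      (l2.flatMap fun b => l1.flatMap fun a => g a b) := by
  induction l1 with
  | nil => simp
  | cons a t ih =>
    simp only [List.flatMap_cons]
    refine List.Perm.trans (ih.append_left _) ?_
    exact (pvPermFlatMapAppend l2 (g a) (fun b => t.flatMap fun a' => g a' b)).symm

theorem pvPermTri {γ : Type} (g : Nat → Nat → List γ) (n : Nat) :
    ((List.range n).flatMap fun x => (List.range (n-x)).flatMap fun k => g x (x+k)).Perm
      ((List.range n).flatMap fun i0 => (List.range (i0+1)).flatMap fun x => g x i0) := by
  induction n with
  | zero => simp
  | succ n ih =>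
    have hL : ((List.range (n+1)).flatMap fun x => (List.range (n+1-x)).flatMap fun k => g x (x+k))
        = ((List.range n).flatMap fun x => ((List.range (n-x)).flatMap fun k => g x (x+k)) ++ g x n)
          ++ g n n := by
      rw [List.range_succ, List.flatMap_append, List.flatMap_singleton]
      congr 1
      · apply List.flatMap_congr  -- maybe wrong name
        intro x hx
        have hx' : x < n := List.mem_range.mp hx
        have : n + 1 - x = (n - x) + 1 := by omega
        rw [this, List.range_succ, List.flatMap_append, List.flatMap_singleton]
        congr 2
        omega
      · have : n + 1 - n = 1 := by omega
        rw [this]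
        simp
    have hR : ((List.range (n+1)).flatMap fun i0 => (List.range (i0+1)).flatMap fun x => g x i0)
        = ((List.range n).flatMap fun i0 => (List.range (i0+1)).flatMap fun x => g x i0)
          ++ (((List.range n).flatMap fun x => g x n) ++ g n n) := by
      rw [List.range_succ, List.flatMap_append, List.flatMap_singleton, List.range_succ,
        List.flatMap_append, List.flatMap_singleton]
    rw [hL, hR, ← List.append_assoc]
    refine List.Perm.append ?_ (List.Perm.refl (g n n))
    refine List.Perm.trans (pvPermFlatMapAppend _ _ _) ?_
    exact ih.append (List.Perm.refl _)

theorem pvPairwiseFlatMapRange {γ : Type} {R : γ → γ → Prop} (f : Nat → List γ) (n : Nat)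
    (h1 : ∀ i, i < n → (f i).Pairwise R)
    (h2 : ∀ i j, i < j → j < n → ∀ a ∈ f i, ∀ b ∈ f j, R a b) :
    ((List.range n).flatMap f).Pairwise R := by
  rw [List.flatMap_def, List.pairwise_flatten]
  constructor
  · intro l hl
    obtain ⟨i, hi, rfl⟩ := List.mem_map.mp hl
    exact h1 i (List.mem_range.mp hi)
  · rw [List.pairwise_map]
    refine List.Pairwise.imp_of_mem ?_ List.pairwise_lt_range
    intro i j hi hj hij
    exact h2 i j hij (List.mem_range.mp hj)

theorem pvPre2_zero_rows (m : List (List Int)) (b : Nat) : pvPre2 m 0 b = 0 := by simp [pvPre2]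

theorem pvPre2_zero_cols (m : List (List Int)) (a : Nat) : pvPre2 m a 0 = 0 := by simp [pvPre2]

theorem pvPre2_succ_row (m : List (List Int)) (a b : Nat) (ha : a < m.length) :
    pvPre2 m (a+1) b = pvPre2 m a b + ((m.getD a []).take b).sum := by
  rw [pvPre2, pvPre2, List.take_succ_eq_append_getElem ha]
  simp [List.getD_eq_getElem?_getD, ha]

theorem pvSumTakeSucc (r : List Int) (b : Nat) (hb : b < r.length) :
    (r.take (b+1)).sum = (r.take b).sum + r.getD b 0 := by
  rw [List.take_succ_eq_append_getElem hb]
  simp [List.getD_eq_getElem?_getD, hb]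

theorem pvPre2_rec (m : List (List Int)) (a b : Nat) (ha : a < m.length)
    (hb : b < (m.getD a []).length) :
    pvPre2 m (a+1) (b+1) =
      pvPre2 m a (b+1) + pvPre2 m (a+1) b - pvPre2 m a b + (m.getD a []).getD b 0 := by
  rw [pvPre2_succ_row m a (b+1) ha, pvPre2_succ_row m a b ha, pvSumTakeSucc _ _ hb]
  ring

theorem pvSumTakeGetD (r : List Int) (d : Nat) (hd : d ≤ r.length) :
    pvPS (fun e => r.getD e 0) d = (r.take d).sum := by
  induction d with
  | zero => simp [pvPS]
  | succ k ih =>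
    rw [pvPS, List.range_succ]
    simp only [List.map_append, List.sum_append, List.map_cons, List.map_nil]
    rw [← pvPS, ih (by omega), pvSumTakeSucc r k (by omega)]
    simp

theorem pvPS_succ (h : ℕ → ℤ) (t : ℕ) : pvPS h (t+1) = pvPS h t + h t := by
  rw [pvPS, pvPS, List.range_succ]
  simp

theorem pvPS_add (f g : ℕ → ℤ) (d : ℕ) :
    pvPS (fun e => f e + g e) d = pvPS f d + pvPS g d := by
  induction d with
  | zero => simp [pvPS]
  | succ t ih => rw [pvPS_succ, pvPS_succ, pvPS_succ, ih]; ring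

theorem pvSeg_self (m : List (List Int)) (x d : ℕ) : pvSeg m x x d = 0 := by
  simp [pvSeg]

theorem pvSeg_succ (m : List (List Int)) (x i d : ℕ) (hx : x ≤ i) :
    pvSeg m x (i+1) d = pvSeg m x i d + (m.getD i []).getD d 0 := by
  rw [pvSeg, pvSeg, show i + 1 - x = (i - x) + 1 by omega, List.range_succ]
  simp [show x + (i - x) = i by omega]

theorem pvPSBand (m : List (List Int)) (hrow : ∀ r ∈ m, (m.headD []).length ≤ r.length)
    (x i d : ℕ) (hx : x ≤ i) (hi : i ≤ m.length) (hd : d ≤ (m.headD []).length) :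
    pvPS (fun e => pvSeg m x i e) d = pvPre2 m i d - pvPre2 m x d := by
  induction i, hx using Nat.le_induction with
  | base => simp [pvSeg_self, pvPS]
  | succ i hxi ih =>
    have hi' : i < m.length := by omega
    have hlen : d ≤ (m.getD i []).length := le_trans hd (hrow _ (pvGetDMem m i hi'))
    have h1 : pvPS (fun e => pvSeg m x (i+1) e) d
        = pvPS (fun e => pvSeg m x i e) d + pvPS (fun e => (m.getD i []).getD e 0) d := by
      rw [← pvPS_add]
      have he : (fun e => pvSeg m x (i+1) e) = fun e => pvSeg m x i e + (m.getD i []).getD e 0 := by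
        funext e; exact pvSeg_succ m x i e hxi
      rw [he]
    rw [h1, ih (by omega), pvSumTakeGetD _ _ hlen, pvPre2_succ_row m i d hi']
    ring

theorem pvGet2_tab (m : List (List Int)) (i j a b : Nat)
    (ha : a ≤ m.length) (hb : b ≤ (m.headD []).length) :
    pvGet2 (pvTab m i j) (a : Int) (b : Int) =
      if a < i ∨ (a = i ∧ b ≤ j) then pvPre2 m a b else 0 := by
  rw [pvGet2, pvTab, PySem.List.pyGetD_natCast, PySem.List.pyGetD_natCast,
    pvGetDMapRange _ _ _ _ (by omega), pvGetDMapRange _ _ _ _ (by omega)]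

theorem pvTab_init (m : List (List Int)) :
    ((PySem.List.pyRange 0 ((m.length : Int) + 1) 1).map
        (fun _ => PySem.List.pyRepeat [0] (((m.headD []).length : Int) + 1))) =
      pvTab m 0 (m.headD []).length := by
  have h1 : ((m.length : Int) + 1) = ((m.length + 1 : Nat) : Int) := by push_cast; ring
  have h2 : (((m.headD []).length : Int) + 1) = (((m.headD []).length + 1 : Nat) : Int) := by
    push_cast; ring
  rw [h1, h2, PySem.List.pyRange_one, PySem.List.pyRepeat_singleton]
  simp only [Int.sub_zero, Int.toNat_natCast, List.map_map, pvTab]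
  refine List.map_congr_left ?_
  intro a _
  show List.replicate ((m.headD []).length + 1) (0:Int) = _
  symm
  rw [List.eq_replicate_iff]
  refine ⟨by simp, ?_⟩
  intro v hv
  obtain ⟨b, hb, rfl⟩ := List.mem_map.mp hv
  split_ifs with h
  · rcases h with h | ⟨rfl, -⟩
    · omega
    · exact pvPre2_zero_rows m b
  · rfl

theorem pvTab_row_advance (m : List (List Int)) (i0 : Nat) :
    pvTab m i0 (m.headD []).length = pvTab m (i0+1) 0 := by
  unfold pvTab
  refine List.map_congr_left fun a _ => List.map_congr_left fun b hb => ?_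
  have hb' : b ≤ (m.headD []).length := by
    have := List.mem_range.mp hb; omega
  split_ifs with h1 h2 h2
  · rfl
  · exfalso; omega
  · rcases h2 with h2 | ⟨rfl, hb0⟩
    · exfalso; omega
    · rw [eq_comm]
      have hb0' : b = 0 := by omega
      subst hb0'
      exact pvPre2_zero_cols m (i0+1)
  · rfl

theorem pvTab_set (m : List (List Int)) (i0 j0 : Nat)
    (hi : i0 < m.length) (hj : j0 < (m.headD []).length) :
    PySem.List.pySetD (pvTab m (i0+1) j0) ((i0+1 : Nat) : Int)
        (PySem.List.pySetD (PySem.List.pyGetD (pvTab m (i0+1) j0) ((i0+1 : Nat) : Int) [])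
          ((j0+1 : Nat) : Int) (pvPre2 m (i0+1) (j0+1))) =
      pvTab m (i0+1) (j0+1) := by
  rw [pvTab, PySem.List.pyGetD_natCast, pvGetDMapRange _ _ _ _ (by omega),
    PySem.List.pySetD_natCast, PySem.List.pySetD_natCast,
    pvSetMapRange _ _ _ _ (by omega), pvSetMapRange _ _ _ _ (by omega), pvTab]
  refine List.map_congr_left fun a _ => ?_
  by_cases hA : a = i0 + 1
  · subst hA
    rw [if_pos rfl]
    refine List.map_congr_left fun b _ => ?_
    by_cases hbj : b = j0 + 1
    · subst hbj
      rw [if_pos rfl, if_pos (by omega)]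
    · rw [if_neg hbj]
      split_ifs <;> first | rfl | omega
  · rw [if_neg hA]
    refine List.map_congr_left fun b _ => ?_
    split_ifs <;> first | rfl | omega

theorem pvCellStep (m : List (List Int))
    (hrow : ∀ r ∈ m, (m.headD []).length ≤ r.length)
    (i0 j0 : Nat) (hi : i0 < m.length) (hj : j0 < (m.headD []).length) (ans : List String) :
    (fun (st : List (List Int) × List String) (j : Int) =>
        let v := pvGet2 st.1 (((i0+1 : Nat) : Int) - 1) j + pvGet2 st.1 ((i0+1 : Nat) : Int) (j - 1)
                  - pvGet2 st.1 (((i0+1 : Nat) : Int) - 1) (j - 1) + pvGet2 m (((i0+1 : Nat) : Int) - 1) (j - 1)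
        let P := PySem.List.pySetD st.1 ((i0+1 : Nat) : Int)
          (PySem.List.pySetD (PySem.List.pyGetD st.1 ((i0+1 : Nat) : Int) []) j v)
        let ans := (PySem.List.pyRange 0 ((i0+1 : Nat) : Int) 1).foldl (fun ans x =>
          (PySem.List.pyRange 0 j 1).foldl (fun ans y =>
            if pvGet2 P ((i0+1 : Nat) : Int) j - (pvGet2 P ((i0+1 : Nat) : Int) y + pvGet2 P x j) + pvGet2 P x y = 0 then
              ans ++ [pvFmt x y (((i0+1 : Nat) : Int) - 1) (j - 1)]
            else ans) ans) st.2
        (P, ans))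
      (pvTab m (i0+1) j0, ans) ((j0+1 : Nat) : Int)
    = (pvTab m (i0+1) (j0+1), ans ++ (pvCell m i0 j0).map pvFmt4) := by
  have hc1 : (((i0+1 : Nat) : Int) - 1) = (i0 : Int) := by push_cast; ring
  have hc2 : (((j0+1 : Nat) : Int) - 1) = (j0 : Int) := by push_cast; ring
  have hjlen : j0 < (m.getD i0 []).length :=
    lt_of_lt_of_le hj (hrow _ (pvGetDMem m i0 hi))
  simp only [hc1, hc2]
  have hv : pvGet2 (pvTab m (i0+1) j0) (i0 : Int) ((j0+1 : Nat) : Int)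
      + pvGet2 (pvTab m (i0+1) j0) ((i0+1 : Nat) : Int) (j0 : Int)
      - pvGet2 (pvTab m (i0+1) j0) (i0 : Int) (j0 : Int)
      + pvGet2 m (i0 : Int) (j0 : Int) = pvPre2 m (i0+1) (j0+1) := by
    rw [pvGet2_tab m _ _ i0 (j0+1) (by omega) (by omega),
        pvGet2_tab m _ _ (i0+1) j0 (by omega) (by omega),
        pvGet2_tab m _ _ i0 j0 (by omega) (by omega)]
    rw [if_pos (by omega), if_pos (by omega), if_pos (by omega)]
    have hm : pvGet2 m (i0 : Int) (j0 : Int) = (m.getD i0 []).getD j0 0 := by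
      rw [pvGet2, PySem.List.pyGetD_natCast, PySem.List.pyGetD_natCast]
    rw [hm, pvPre2_rec m i0 j0 hi hjlen]
  rw [hv, pvTab_set m i0 j0 hi hj]
  refine Prod.ext rfl ?_
  show (PySem.List.pyRange 0 ((i0+1 : Nat) : Int) 1).foldl _ ans = _
  have hcollapse : ∀ (x : Int), (PySem.List.pyRange 0 ((j0+1 : Nat) : Int) 1).foldl (fun ans y =>
      if pvGet2 (pvTab m (i0+1) (j0+1)) ((i0+1 : Nat) : Int) ((j0+1 : Nat) : Int)
          - (pvGet2 (pvTab m (i0+1) (j0+1)) ((i0+1 : Nat) : Int) y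
             + pvGet2 (pvTab m (i0+1) (j0+1)) x ((j0+1 : Nat) : Int))
          + pvGet2 (pvTab m (i0+1) (j0+1)) x y = 0 then
        ans ++ [pvFmt x y (i0 : Int) (j0 : Int)]
      else ans) = fun ans => ans ++
        (((List.range (j0+1)).map (Nat.cast : ℕ → ℤ)).filter (fun y =>
          decide (pvGet2 (pvTab m (i0+1) (j0+1)) ((i0+1 : Nat) : Int) ((j0+1 : Nat) : Int)
          - (pvGet2 (pvTab m (i0+1) (j0+1)) ((i0+1 : Nat) : Int) y
             + pvGet2 (pvTab m (i0+1) (j0+1)) x ((j0+1 : Nat) : Int))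
          + pvGet2 (pvTab m (i0+1) (j0+1)) x y = 0))).map
          (fun y => pvFmt x y (i0 : Int) (j0 : Int)) := by
    intro x
    funext ans
    rw [pvRangeNat, PySem.List.foldl_append_ite]
  have hc3 : ((i0+1 : Nat) : Int) = (i0 : Int) + 1 := by push_cast; ring
  calc (PySem.List.pyRange 0 ((i0+1 : Nat) : Int) 1).foldl (fun ans x =>
          (PySem.List.pyRange 0 ((j0+1 : Nat) : Int) 1).foldl (fun ans y =>
            if pvGet2 (pvTab m (i0+1) (j0+1)) ((i0+1 : Nat) : Int) ((j0+1 : Nat) : Int)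
                - (pvGet2 (pvTab m (i0+1) (j0+1)) ((i0+1 : Nat) : Int) y
                   + pvGet2 (pvTab m (i0+1) (j0+1)) x ((j0+1 : Nat) : Int))
                + pvGet2 (pvTab m (i0+1) (j0+1)) x y = 0 then
              ans ++ [pvFmt x y (i0 : Int) (j0 : Int)]
            else ans) ans) ans
      = (PySem.List.pyRange 0 ((i0+1 : Nat) : Int) 1).foldl (fun ans x => ans ++
          (((List.range (j0+1)).map (Nat.cast : ℕ → ℤ)).filter (fun y =>
            decide (pvGet2 (pvTab m (i0+1) (j0+1)) ((i0+1 : Nat) : Int) ((j0+1 : Nat) : Int)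
            - (pvGet2 (pvTab m (i0+1) (j0+1)) ((i0+1 : Nat) : Int) y
               + pvGet2 (pvTab m (i0+1) (j0+1)) x ((j0+1 : Nat) : Int))
            + pvGet2 (pvTab m (i0+1) (j0+1)) x y = 0))).map
            (fun y => pvFmt x y (i0 : Int) (j0 : Int))) ans := by
        refine PySem.List.foldl_congr_mem _ _ _ _ ?_
        intro acc x _
        exact congrFun (hcollapse x) acc
    _ = ans ++ (pvCell m i0 j0).map pvFmt4 := by
        rw [PySem.List.foldl_append_eq_flatMap, pvRangeNat, List.flatMap_map]
        congr 1
        rw [pvCell, List.map_flatMap]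
        refine List.flatMap_congr ?_
        intro x hx
        have hx' : x ≤ i0 := by have := List.mem_range.mp hx; omega
        rw [List.filter_map, List.map_map, List.map_map]
        have hfilter : ∀ y ∈ List.range (j0+1),
            (((fun y => decide (pvGet2 (pvTab m (i0+1) (j0+1)) ((i0+1 : Nat) : Int) ((j0+1 : Nat) : Int)
            - (pvGet2 (pvTab m (i0+1) (j0+1)) ((i0+1 : Nat) : Int) y
               + pvGet2 (pvTab m (i0+1) (j0+1)) ((x : Nat) : Int) ((j0+1 : Nat) : Int))
            + pvGet2 (pvTab m (i0+1) (j0+1)) ((x : Nat) : Int) y = 0)) ∘ (Nat.cast : ℕ → ℤ)) y)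
            = pvCondB m (i0+1) (j0+1) x y := by
          intro y hy
          have hy' : y ≤ j0 := by have := List.mem_range.mp hy; omega
          simp only [Function.comp_apply]
          rw [pvGet2_tab m _ _ (i0+1) (j0+1) (by omega) (by omega),
              pvGet2_tab m _ _ (i0+1) y (by omega) (by omega),
              pvGet2_tab m _ _ x (j0+1) (by omega) (by omega),
              pvGet2_tab m _ _ x y (by omega) (by omega),
              if_pos (by omega), if_pos (by omega), if_pos (by omega), if_pos (by omega),
              pvCondB, Bool.beq_eq_decide_eq]
        rw [List.filter_congr hfilter]
        refine List.map_congr_left ?_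
        intro y _
        simp only [Function.comp_apply, pvFmt4, hc1, hc2]

theorem pvRowFold (m : List (List Int))
    (hrow : ∀ r ∈ m, (m.headD []).length ≤ r.length)
    (i0 : Nat) (hi : i0 < m.length) :
    ∀ t, t ≤ (m.headD []).length → ∀ ans,
    (PySem.List.pyRange 1 ((t : Int) + 1) 1).foldl
      (fun (st : List (List Int) × List String) (j : Int) =>
        let v := pvGet2 st.1 (((i0+1 : Nat) : Int) - 1) j + pvGet2 st.1 ((i0+1 : Nat) : Int) (j - 1)
                  - pvGet2 st.1 (((i0+1 : Nat) : Int) - 1) (j - 1) + pvGet2 m (((i0+1 : Nat) : Int) - 1) (j - 1)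
        let P := PySem.List.pySetD st.1 ((i0+1 : Nat) : Int)
          (PySem.List.pySetD (PySem.List.pyGetD st.1 ((i0+1 : Nat) : Int) []) j v)
        let ans := (PySem.List.pyRange 0 ((i0+1 : Nat) : Int) 1).foldl (fun ans x =>
          (PySem.List.pyRange 0 j 1).foldl (fun ans y =>
            if pvGet2 P ((i0+1 : Nat) : Int) j - (pvGet2 P ((i0+1 : Nat) : Int) y + pvGet2 P x j) + pvGet2 P x y = 0 then
              ans ++ [pvFmt x y (((i0+1 : Nat) : Int) - 1) (j - 1)]
            else ans) ans) st.2
        (P, ans))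
      (pvTab m (i0+1) 0, ans)
    = (pvTab m (i0+1) t,
       ans ++ (List.range t).flatMap fun j0 => (pvCell m i0 j0).map pvFmt4) := by
  intro t
  induction t with
  | zero =>
    intro _ ans
    rw [show ((0 : Nat) : Int) + 1 = 1 by norm_num, PySem.List.pyRange_one_eq_nil (show (1:Int) ≤ 1 by norm_num)]
    simp
  | succ t ih =>
    intro ht ans
    have h1 : ((t+1 : Nat) : Int) + 1 = ((t : Int) + 1) + 1 := by push_cast; ring
    have h2 : (t : Int) + 1 = ((t+1 : Nat) : Int) := by push_cast; ring
    rw [h1, PySem.List.pyRange_one_succ_right (show (1:Int) ≤ (t:Int)+1 by omega), List.foldl_append,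
      ih (by omega) ans, List.foldl_cons, List.foldl_nil, h2]
    have hc := pvCellStep m hrow i0 t hi (by omega)
      (ans ++ ((List.range t).flatMap fun j0 => (pvCell m i0 j0).map pvFmt4))
    rw [List.range_succ, List.flatMap_append, List.flatMap_singleton, ← List.append_assoc]
    exact hc

theorem pvOuterFold (m : List (List Int))
    (hrow : ∀ r ∈ m, (m.headD []).length ≤ r.length) :
    ∀ t, t ≤ m.length → ∀ ans,
    (PySem.List.pyRange 1 ((t : Int) + 1) 1).foldl
      (fun (st : List (List Int) × List String) (i : Int) =>
        (PySem.List.pyRange 1 (((m.headD []).length : Int) + 1) 1).foldl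
          (fun (st : List (List Int) × List String) (j : Int) =>
            let v := pvGet2 st.1 (i - 1) j + pvGet2 st.1 i (j - 1)
                      - pvGet2 st.1 (i - 1) (j - 1) + pvGet2 m (i - 1) (j - 1)
            let P := PySem.List.pySetD st.1 i
              (PySem.List.pySetD (PySem.List.pyGetD st.1 i []) j v)
            let ans := (PySem.List.pyRange 0 i 1).foldl (fun ans x =>
              (PySem.List.pyRange 0 j 1).foldl (fun ans y =>
                if pvGet2 P i j - (pvGet2 P i y + pvGet2 P x j) + pvGet2 P x y = 0 then
                  ans ++ [pvFmt x y (i - 1) (j - 1)]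
                else ans) ans) st.2
            (P, ans)) st)
      (pvTab m 0 (m.headD []).length, ans)
    = (pvTab m t (m.headD []).length,
       ans ++ (List.range t).flatMap fun i0 =>
         (List.range (m.headD []).length).flatMap fun j0 => (pvCell m i0 j0).map pvFmt4) := by
  intro t
  induction t with
  | zero =>
    intro _ ans
    rw [show ((0 : Nat) : Int) + 1 = 1 by norm_num, PySem.List.pyRange_one_eq_nil (show (1:Int) ≤ 1 by norm_num)]
    simp
  | succ t ih =>
    intro ht ans
    have h1 : ((t+1 : Nat) : Int) + 1 = ((t : Int) + 1) + 1 := by push_cast; ring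
    have h2 : (t : Int) + 1 = ((t+1 : Nat) : Int) := by push_cast; ring
    rw [h1, PySem.List.pyRange_one_succ_right (show (1:Int) ≤ (t:Int)+1 by omega), List.foldl_append,
      ih (by omega) ans, List.foldl_cons, List.foldl_nil, h2, pvTab_row_advance m t]
    have hr := pvRowFold m hrow t (by omega) (m.headD []).length (le_refl _)
      (ans ++ ((List.range t).flatMap fun i0 =>
        (List.range (m.headD []).length).flatMap fun j0 => (pvCell m i0 j0).map pvFmt4))
    rw [List.range_succ, List.flatMap_append, List.flatMap_singleton, ← List.append_assoc]
    exact hr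

theorem pvA_char (m : List (List Int))
    (hm : m ≠ []) (hrow : ∀ r ∈ m, (m.headD []).length ≤ r.length) :
    submatrixSum m = (pvLq m).map pvFmt4 := by
  unfold submatrixSum
  simp only [PySem.List.len_eq, pvHead']
  rw [pvTab_init]
  refine Eq.trans (congrArg Prod.snd (pvOuterFold m hrow m.length (le_refl _) [])) ?_
  simp only [List.nil_append, pvLq, List.map_flatMap]

theorem pvColFoldAux (c : ℕ) (g : ℕ → ℤ) (r : List ℤ) :
    ∀ t, t ≤ c →
    (PySem.List.pyRange 0 (t : Int) 1).foldl
      (fun cs cc => PySem.List.pySetD cs cc (PySem.List.pyGetD cs cc 0 + PySem.List.pyGetD r cc 0))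
      ((List.range c).map g)
    = (List.range c).map (fun d => if d < t then g d + r.getD d 0 else g d) := by
  intro t
  induction t with
  | zero =>
    intro _
    rw [show ((0:Nat) : Int) = 0 by norm_num, PySem.List.pyRange_one_eq_nil (by norm_num)]
    simp
  | succ t ih =>
    intro ht
    rw [show ((t+1 : Nat) : Int) = (t : Int) + 1 by push_cast; ring,
      PySem.List.pyRange_one_succ_right (show (0:Int) ≤ (t:Int) by omega),
      List.foldl_append, ih (by omega), List.foldl_cons, List.foldl_nil,
      PySem.List.pyGetD_natCast, PySem.List.pyGetD_natCast, PySem.List.pySetD_natCast,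
      pvGetDMapRange _ _ _ _ (by omega), pvSetMapRange _ _ _ _ (by omega)]
    rw [if_neg (by omega)]
    refine List.map_congr_left fun d _ => ?_
    split_ifs <;> first | rfl | omega | (subst_vars; rfl)

theorem pvPrefFoldAux (c : ℕ) (h : ℕ → ℤ) :
    ∀ t, t ≤ c →
    (PySem.List.pyRange 0 (t : Int) 1).foldl
      (fun pf cc => PySem.List.pySetD pf (cc + 1)
        (PySem.List.pyGetD pf cc 0 + PySem.List.pyGetD ((List.range c).map h) cc 0))
      ((List.range (c+1)).map (fun _ => (0:Int)))
    = (List.range (c+1)).map (fun d => if d ≤ t then pvPS h d else 0) := by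
  intro t
  induction t with
  | zero =>
    intro _
    rw [show ((0:Nat) : Int) = 0 by norm_num, PySem.List.pyRange_one_eq_nil (by norm_num)]
    simp only [List.foldl_nil]
    refine List.map_congr_left fun d _ => ?_
    split_ifs with hd
    · rw [show d = 0 by omega]; simp [pvPS]
    · rfl
  | succ t ih =>
    intro ht
    rw [show ((t+1 : Nat) : Int) = (t : Int) + 1 by push_cast; ring,
      PySem.List.pyRange_one_succ_right (show (0:Int) ≤ (t:Int) by omega),
      List.foldl_append, ih (by omega), List.foldl_cons, List.foldl_nil,
      PySem.List.pyGetD_natCast, PySem.List.pyGetD_natCast,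
      show (t : Int) + 1 = ((t+1 : Nat) : Int) by push_cast; ring,
      PySem.List.pySetD_natCast,
      pvGetDMapRange _ _ _ _ (show t < c+1 by omega),
      pvGetDMapRange _ _ _ _ (show t < c by omega),
      pvSetMapRange _ _ _ _ (show t+1 < c+1 by omega)]
    rw [if_pos (le_refl t)]
    refine List.map_congr_left fun d _ => ?_
    by_cases hd : d = t + 1
    · subst hd
      rw [if_pos rfl, if_pos (le_refl _), pvPS_succ]
    · rw [if_neg hd]
      split_ifs <;> first | rfl | omega

theorem pvDictGetD (pref : List ℤ) (t : ℕ) (v : ℤ) :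
    (((List.range t).map (Nat.cast : ℕ → ℤ)).foldl
        (fun (d : PySem.Dict Int (List Int)) jj => d.modify (PySem.List.pyGetD pref jj 0) [] (· ++ [jj]))
        PySem.Dict.empty).getD v []
    = ((List.range t).map (Nat.cast : ℕ → ℤ)).filter (fun jj => PySem.List.pyGetD pref jj 0 == v) := by
  have h1 : (((List.range t).map (Nat.cast : ℕ → ℤ)).foldl
        (fun (d : PySem.Dict Int (List Int)) jj => d.modify (PySem.List.pyGetD pref jj 0) [] (· ++ [jj]))
        PySem.Dict.empty)
      = ((((List.range t).map (Nat.cast : ℕ → ℤ)).map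
          (fun jj => (PySem.List.pyGetD pref jj 0, jj))).foldl
          (fun (d : PySem.Dict Int (List Int)) p => d.modify p.1 [] (· ++ [p.2]))
          PySem.Dict.empty) := by
    rw [List.foldl_map, List.foldl_map, List.foldl_map]
  rw [h1, PySem.Dict.getD_foldl_modify_append]
  rw [List.filter_map, List.map_map]
  simp [Function.comp_def]

theorem pvDictFold (pref : List ℤ) (iv xv : Int) :
    ∀ (t : ℕ) (hs0 : List (Int × Int × Int × Int)),
    (PySem.List.pyRange 0 (t : Int) 1).foldl
      (fun (dh : PySem.Dict Int (List Int) × List (Int × Int × Int × Int)) j =>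
        (dh.1.modify (PySem.List.pyGetD pref j 0) [] (fun l => l ++ [j]),
         dh.2 ++ (dh.1.getD (PySem.List.pyGetD pref j 0) []).map (fun y => (iv, j, xv, y))))
      (PySem.Dict.empty, hs0)
    = (((List.range t).map (Nat.cast : ℕ → ℤ)).foldl
        (fun (d : PySem.Dict Int (List Int)) jj => d.modify (PySem.List.pyGetD pref jj 0) [] (fun l => l ++ [jj]))
        PySem.Dict.empty,
       hs0 ++ (List.range t).flatMap (fun j =>
         (((List.range j).map (Nat.cast : ℕ → ℤ)).filter
           (fun y => PySem.List.pyGetD pref y 0 == PySem.List.pyGetD pref (j : Int) 0)).map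
           (fun y => (iv, (j : Int), xv, y)))) := by
  intro t
  induction t with
  | zero =>
    intro hs0
    rw [show ((0:Nat) : Int) = 0 by norm_num, PySem.List.pyRange_one_eq_nil (by norm_num)]
    simp
  | succ t ih =>
    intro hs0
    rw [show ((t+1 : Nat) : Int) = (t : Int) + 1 by push_cast; ring,
      PySem.List.pyRange_one_succ_right (show (0:Int) ≤ (t:Int) by omega),
      List.foldl_append, ih hs0, List.foldl_cons, List.foldl_nil]
    refine Prod.ext ?_ ?_
    · show _ = (((List.range (t+1)).map (Nat.cast : ℕ → ℤ)).foldl _ _)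
      rw [List.range_succ, List.map_append, List.foldl_append]
      rfl
    · show hs0 ++ _ ++ _ = hs0 ++ _
      rw [pvDictGetD pref t (PySem.List.pyGetD pref (t : Int) 0), List.range_succ,
        List.flatMap_append, List.flatMap_singleton, ← List.append_assoc]

theorem pvReplMap (c : ℕ) :
    PySem.List.pyRepeat [(0:Int)] ((c : Int) + 1) = (List.range (c+1)).map (fun _ => (0:Int)) := by
  rw [show ((c:Int) + 1) = ((c+1 : Nat) : Int) by push_cast; ring, PySem.List.pyRepeat_singleton]
  symm
  rw [List.eq_replicate_iff]
  constructor
  · simp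
  · intro v hv
    simp only [List.mem_map] at hv
    obtain ⟨_, _, rfl⟩ := hv
    rfl

theorem pvReplMap0 (c : ℕ) :
    PySem.List.pyRepeat [(0:Int)] (c : Int) = (List.range c).map (fun _ => (0:Int)) := by
  rw [PySem.List.pyRepeat_singleton]
  symm
  rw [List.eq_replicate_iff]
  constructor
  · simp
  · intro v hv
    simp only [List.mem_map] at hv
    obtain ⟨_, _, rfl⟩ := hv
    rfl

theorem pvBandList (m : List (List Int)) (hrow : ∀ r ∈ m, (m.headD []).length ≤ r.length)
    (x i0 : ℕ) (hx : x ≤ i0) (hi : i0 < m.length) :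
    (List.range ((m.headD []).length + 1)).flatMap (fun j =>
      (((List.range j).map (Nat.cast : ℕ → ℤ)).filter
        (fun y => PySem.List.pyGetD ((List.range ((m.headD []).length + 1)).map
            (fun d => pvPS (fun e => pvSeg m x (i0+1) e) d)) y 0
          == PySem.List.pyGetD ((List.range ((m.headD []).length + 1)).map
            (fun d => pvPS (fun e => pvSeg m x (i0+1) e) d)) (j : Int) 0)).map
        (fun y => (((i0+1 : Nat) : Int), (j : Int), ((x : Nat) : Int), y)))
    = pvBand m x (i0+1) := by
  rw [pvBand]
  refine List.flatMap_congr ?_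
  intro j hj
  have hj' : j ≤ (m.headD []).length := by have := List.mem_range.mp hj; omega
  rw [List.filter_map, List.map_map]
  have hfilter : ∀ y ∈ List.range j,
      (((fun y => PySem.List.pyGetD ((List.range ((m.headD []).length + 1)).map
            (fun d => pvPS (fun e => pvSeg m x (i0+1) e) d)) y 0
          == PySem.List.pyGetD ((List.range ((m.headD []).length + 1)).map
            (fun d => pvPS (fun e => pvSeg m x (i0+1) e) d)) (j : Int) 0) ∘ (Nat.cast : ℕ → ℤ)) y)
      = pvCondB m (i0+1) j x y := by
    intro y hy
    have hy' : y < j := List.mem_range.mp hy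
    simp only [Function.comp_apply]
    rw [PySem.List.pyGetD_natCast, PySem.List.pyGetD_natCast,
      pvGetDMapRange _ _ _ _ (show y < (m.headD []).length + 1 by omega),
      pvGetDMapRange _ _ _ _ (show j < (m.headD []).length + 1 by omega),
      pvPSBand m hrow x (i0+1) y (by omega) (by omega) (by omega),
      pvPSBand m hrow x (i0+1) j (by omega) (by omega) hj',
      pvCondB, Bool.beq_eq_decide_eq, Bool.beq_eq_decide_eq]
    exact decide_eq_decide.mpr (by omega)
  rw [List.filter_congr hfilter]
  refine List.map_congr_left fun y _ => rfl

theorem pvBandStep (m : List (List Int)) (hrow : ∀ r ∈ m, (m.headD []).length ≤ r.length)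
    (x i0 : ℕ) (hx : x ≤ i0) (hi : i0 < m.length) (hs0 : List (Int × Int × Int × Int))
    (xv : Int) :
    (fun (st : List Int × List (Int × Int × Int × Int)) (i : Int) =>
      let r := PySem.List.pyGetD m (i - 1) []
      let colsum := (PySem.List.pyRange 0 ((m.headD []).length : Int) 1).foldl
        (fun cs c => PySem.List.pySetD cs c (PySem.List.pyGetD cs c 0 + PySem.List.pyGetD r c 0)) st.1
      let pref := (PySem.List.pyRange 0 ((m.headD []).length : Int) 1).foldl
        (fun pf c => PySem.List.pySetD pf (c + 1) (PySem.List.pyGetD pf c 0 + PySem.List.pyGetD colsum c 0))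
        (PySem.List.pyRepeat [0] (((m.headD []).length : Int) + 1))
      let inner := (PySem.List.pyRange 0 (((m.headD []).length : Int) + 1) 1).foldl
        (fun (dh : PySem.Dict Int (List Int) × List (Int × Int × Int × Int)) j =>
          let p := PySem.List.pyGetD pref j 0
          (dh.1.modify p [] (fun l => l ++ [j]),
           dh.2 ++ (dh.1.getD p []).map (fun y => (i, j, xv, y))))
        (PySem.Dict.empty, st.2)
      (colsum, inner.2))
      ((List.range (m.headD []).length).map (fun d => pvSeg m x i0 d), hs0) ((i0+1 : Nat) : Int)
    = ((List.range (m.headD []).length).map (fun d => pvSeg m x (i0+1) d),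
       hs0 ++ ((List.range ((m.headD []).length + 1)).flatMap (fun j =>
         (((List.range j).map (Nat.cast : ℕ → ℤ)).filter
           (fun y => PySem.List.pyGetD ((List.range ((m.headD []).length + 1)).map
               (fun d => pvPS (fun e => pvSeg m x (i0+1) e) d)) y 0
             == PySem.List.pyGetD ((List.range ((m.headD []).length + 1)).map
               (fun d => pvPS (fun e => pvSeg m x (i0+1) e) d)) (j : Int) 0)).map
           (fun y => (((i0+1 : Nat) : Int), (j : Int), xv, y))))) := by
  have hc1 : (((i0+1 : Nat) : Int) - 1) = (i0 : Int) := by push_cast; ring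
  simp only [hc1]
  have hr : PySem.List.pyGetD m (i0 : Int) [] = m.getD i0 [] := PySem.List.pyGetD_natCast ..
  rw [hr]
  have hcol : (PySem.List.pyRange 0 ((m.headD []).length : Int) 1).foldl
      (fun cs c => PySem.List.pySetD cs c (PySem.List.pyGetD cs c 0 + PySem.List.pyGetD (m.getD i0 []) c 0))
      ((List.range (m.headD []).length).map (fun d => pvSeg m x i0 d))
      = (List.range (m.headD []).length).map (fun d => pvSeg m x (i0+1) d) := by
    rw [pvColFoldAux (m.headD []).length (fun d => pvSeg m x i0 d) (m.getD i0 [])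
      (m.headD []).length (le_refl _)]
    refine List.map_congr_left fun d hd => ?_
    rw [if_pos (List.mem_range.mp hd), pvSeg_succ m x i0 d hx]
  rw [hcol]
  have hpref : (PySem.List.pyRange 0 ((m.headD []).length : Int) 1).foldl
      (fun pf c => PySem.List.pySetD pf (c + 1) (PySem.List.pyGetD pf c 0
        + PySem.List.pyGetD ((List.range (m.headD []).length).map (fun d => pvSeg m x (i0+1) d)) c 0))
      (PySem.List.pyRepeat [0] (((m.headD []).length : Int) + 1))
      = (List.range ((m.headD []).length + 1)).map (fun d => pvPS (fun e => pvSeg m x (i0+1) e) d) := by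
    rw [pvReplMap, pvPrefFoldAux (m.headD []).length (fun e => pvSeg m x (i0+1) e)
      (m.headD []).length (le_refl _)]
    refine List.map_congr_left fun d hd => ?_
    rw [if_pos (show d ≤ (m.headD []).length by have := List.mem_range.mp hd; omega)]
  rw [hpref]
  refine Prod.ext rfl ?_
  show ((PySem.List.pyRange 0 (((m.headD []).length : Int) + 1) 1).foldl _ (PySem.Dict.empty, hs0)).2 = _
  rw [show (((m.headD []).length : Int) + 1) = (((m.headD []).length + 1 : Nat) : Int) by push_cast; ring]
  rw [pvDictFold _ (((i0+1 : Nat)) : Int) xv ((m.headD []).length + 1) hs0]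

theorem pvIFold (m : List (List Int)) (hrow : ∀ r ∈ m, (m.headD []).length ≤ r.length)
    (x : ℕ) (hx : x < m.length) :
    ∀ (t : ℕ), x + t ≤ m.length → ∀ (hs0 : List (Int × Int × Int × Int)),
    (PySem.List.pyRange ((x : Int) + 1) ((x : Int) + 1 + (t : Int)) 1).foldl
      (fun (st : List Int × List (Int × Int × Int × Int)) (i : Int) =>
        let r := PySem.List.pyGetD m (i - 1) []
        let colsum := (PySem.List.pyRange 0 ((m.headD []).length : Int) 1).foldl
          (fun cs c => PySem.List.pySetD cs c (PySem.List.pyGetD cs c 0 + PySem.List.pyGetD r c 0)) st.1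
        let pref := (PySem.List.pyRange 0 ((m.headD []).length : Int) 1).foldl
          (fun pf c => PySem.List.pySetD pf (c + 1) (PySem.List.pyGetD pf c 0 + PySem.List.pyGetD colsum c 0))
          (PySem.List.pyRepeat [0] (((m.headD []).length : Int) + 1))
        let inner := (PySem.List.pyRange 0 (((m.headD []).length : Int) + 1) 1).foldl
          (fun (dh : PySem.Dict Int (List Int) × List (Int × Int × Int × Int)) j =>
            let p := PySem.List.pyGetD pref j 0
            (dh.1.modify p [] (fun l => l ++ [j]),
             dh.2 ++ (dh.1.getD p []).map (fun y => (i, j, (x : Int), y))))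
          (PySem.Dict.empty, st.2)
        (colsum, inner.2))
      ((List.range (m.headD []).length).map (fun d => pvSeg m x x d), hs0)
    = ((List.range (m.headD []).length).map (fun d => pvSeg m x (x+t) d),
       hs0 ++ (List.range t).flatMap (fun k => pvBand m x (x+k+1))) := by
  intro t
  induction t with
  | zero =>
    intro _ hs0
    rw [show ((0:Nat) : Int) = 0 by norm_num, add_zero,
      PySem.List.pyRange_one_eq_nil (le_refl _)]
    simp
  | succ t ih =>
    intro ht hs0
    rw [show ((x : Int) + 1 + ((t+1 : Nat) : Int)) = ((x : Int) + 1 + (t : Int)) + 1 by push_cast; ring,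
      PySem.List.pyRange_one_succ_right (show (x : Int) + 1 ≤ (x : Int) + 1 + (t : Int) by omega),
      List.foldl_append, ih (by omega) hs0, List.foldl_cons, List.foldl_nil,
      show ((x : Int) + 1 + (t : Int)) = ((x + t + 1 : Nat) : Int) by push_cast; ring]
    have hb := pvBandStep m hrow x (x+t) (by omega) (by omega)
      (hs0 ++ (List.range t).flatMap (fun k => pvBand m x (x+k+1))) ((x : Nat) : Int)
    rw [List.range_succ, List.flatMap_append, List.flatMap_singleton, ← List.append_assoc]
    refine Eq.trans hb ?_
    rw [pvBandList m hrow x (x+t) (by omega) (by omega)]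
    rfl

theorem pvB_hits (m : List (List Int))
    (hm : m ≠ []) (hrow : ∀ r ∈ m, (m.headD []).length ≤ r.length) :
    (PySem.List.pyRange 0 (m.length : Int) 1).foldl (fun (hits : List (Int × Int × Int × Int)) x =>
      ((PySem.List.pyRange (x + 1) ((m.length : Int) + 1) 1).foldl
        (fun (st : List Int × List (Int × Int × Int × Int)) i =>
          let r := PySem.List.pyGetD m (i - 1) []
          let colsum := (PySem.List.pyRange 0 ((m.headD []).length : Int) 1).foldl
            (fun cs c => PySem.List.pySetD cs c (PySem.List.pyGetD cs c 0 + PySem.List.pyGetD r c 0)) st.1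
          let pref := (PySem.List.pyRange 0 ((m.headD []).length : Int) 1).foldl
            (fun pf c => PySem.List.pySetD pf (c + 1) (PySem.List.pyGetD pf c 0 + PySem.List.pyGetD colsum c 0))
            (PySem.List.pyRepeat [0] (((m.headD []).length : Int) + 1))
          let inner := (PySem.List.pyRange 0 (((m.headD []).length : Int) + 1) 1).foldl
            (fun (dh : PySem.Dict Int (List Int) × List (Int × Int × Int × Int)) j =>
              let p := PySem.List.pyGetD pref j 0
              (dh.1.modify p [] (fun l => l ++ [j]),
               dh.2 ++ (dh.1.getD p []).map (fun y => (i, j, x, y))))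
            (PySem.Dict.empty, st.2)
          (colsum, inner.2))
        (PySem.List.pyRepeat [0] ((m.headD []).length : Int), hits)).2) []
      = pvHB m  := by
  have hbody : ∀ (hits : List (Int × Int × Int × Int)), ∀ x ∈ PySem.List.pyRange 0 (m.length : Int) 1,
      ((PySem.List.pyRange (x + 1) ((m.length : Int) + 1) 1).foldl
        (fun (st : List Int × List (Int × Int × Int × Int)) i =>
          let r := PySem.List.pyGetD m (i - 1) []
          let colsum := (PySem.List.pyRange 0 ((m.headD []).length : Int) 1).foldl
            (fun cs c => PySem.List.pySetD cs c (PySem.List.pyGetD cs c 0 + PySem.List.pyGetD r c 0)) st.1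
          let pref := (PySem.List.pyRange 0 ((m.headD []).length : Int) 1).foldl
            (fun pf c => PySem.List.pySetD pf (c + 1) (PySem.List.pyGetD pf c 0 + PySem.List.pyGetD colsum c 0))
            (PySem.List.pyRepeat [0] (((m.headD []).length : Int) + 1))
          let inner := (PySem.List.pyRange 0 (((m.headD []).length : Int) + 1) 1).foldl
            (fun (dh : PySem.Dict Int (List Int) × List (Int × Int × Int × Int)) j =>
              let p := PySem.List.pyGetD pref j 0
              (dh.1.modify p [] (fun l => l ++ [j]),
               dh.2 ++ (dh.1.getD p []).map (fun y => (i, j, x, y))))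
            (PySem.Dict.empty, st.2)
          (colsum, inner.2))
        (PySem.List.pyRepeat [0] ((m.headD []).length : Int), hits)).2
      = hits ++ (List.range (m.length - x.toNat)).flatMap
          (fun k => pvBand m x.toNat (x.toNat + k + 1)) := by
    intro hits x hx
    obtain ⟨hx0, hxn⟩ := PySem.List.mem_pyRange_one.mp hx
    have hxx : x = ((x.toNat : Nat) : Int) := by omega
    have hx' : x.toNat < m.length := by omega
    rw [hxx]
    have hinit : PySem.List.pyRepeat [(0:Int)] (((m.headD []).length : Nat) : Int)
        = (List.range (m.headD []).length).map (fun d => pvSeg m x.toNat x.toNat d) := by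
      rw [pvReplMap0]
      exact List.map_congr_left fun d _ => (pvSeg_self m x.toNat d).symm
    rw [hinit,
      show ((m.length : Int) + 1)
          = (((x.toNat : Nat) : Int) + 1 + ((m.length - x.toNat : Nat) : Int)) by push_cast; omega,
      pvIFold m hrow x.toNat hx' (m.length - x.toNat) (by omega) hits]
    simp only [Int.toNat_natCast]
  rw [PySem.List.foldl_congr_mem _ _ (fun hits (x : Int) =>
      hits ++ (List.range (m.length - x.toNat)).flatMap (fun k => pvBand m x.toNat (x.toNat + k + 1))) _
      (fun acc x hx => hbody acc x hx),
    PySem.List.foldl_append_eq_flatMap, List.nil_append, pvRangeNat, List.flatMap_map, pvHB]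
  refine List.flatMap_congr ?_
  intro x _
  simp only [Int.toNat_natCast]

theorem pvBand_eq (m : List (List Int)) (x i : ℕ) :
    pvBand m x i = (List.range (m.headD []).length).flatMap (fun j0 =>
      ((List.range (j0+1)).filter (fun y => pvCondB m i (j0+1) x y)).map fun (y : Nat) =>
        ((i : Int), ((j0+1 : Nat) : Int), ((x : Nat) : Int), ((y : Nat) : Int))) := by
  rw [pvBand, List.range_succ_eq_map, List.flatMap_cons, List.flatMap_map]
  simp

theorem pvPerm (m : List (List Int)) : (pvLq m).Perm (pvHB m) := by
  refine List.Perm.symm ?_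
  have h1 : (pvHB m).Perm
      ((List.range m.length).flatMap fun i0 => (List.range (i0+1)).flatMap fun x => pvBand m x (i0+1)) := by
    rw [pvHB]
    have heq : ∀ x ∈ List.range m.length,
        ((List.range (m.length - x)).flatMap fun k => pvBand m x (x+k+1))
        = (List.range (m.length - x)).flatMap fun k => (fun x i0 => pvBand m x (i0+1)) x (x+k) := by
      intro x _
      exact List.flatMap_congr fun k _ => rfl
    rw [List.flatMap_congr heq]
    exact pvPermTri (fun x i0 => pvBand m x (i0+1)) m.length
  refine h1.trans ?_
  rw [pvLq]
  refine List.Perm.flatMap_left _ ?_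
  intro i0 _
  simp only [pvBand_eq]
  have h2 := pvPermRect (List.range (i0+1)) (List.range (m.headD []).length)
    (fun x j0 => ((List.range (j0+1)).filter (fun y => pvCondB m (i0+1) (j0+1) x y)).map fun (y : Nat) =>
      (((i0+1 : Nat) : Int), ((j0+1 : Nat) : Int), ((x : Nat) : Int), ((y : Nat) : Int)))
  exact h2

theorem pvCellMem (m : List (List Int)) (i0 j0 : ℕ) (q : Int × Int × Int × Int)
    (h : q ∈ pvCell m i0 j0) :
    ∃ x y : ℕ, x ≤ i0 ∧ y ≤ j0 ∧
      q = (((i0+1 : Nat) : Int), ((j0+1 : Nat) : Int), ((x : Nat) : Int), ((y : Nat) : Int)) := by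
  simp only [pvCell, List.mem_flatMap, List.mem_map, List.mem_filter, List.mem_range] at h
  obtain ⟨x, hx, y, ⟨hy, _⟩, rfl⟩ := h
  exact ⟨x, y, by omega, by omega, rfl⟩

theorem pvKeyLt (a b : Int × Int × Int × Int) :
    pvKey a < pvKey b ↔ a.1 < b.1 ∨ (a.1 = b.1 ∧ (a.2.1 < b.2.1 ∨ (a.2.1 = b.2.1 ∧
      (a.2.2.1 < b.2.2.1 ∨ (a.2.2.1 = b.2.2.1 ∧ a.2.2.2 < b.2.2.2))))) := by
  rw [pvKey, pvKey]
  simp [Prod.Lex.toLex_lt_toLex]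

theorem pvPairwise (m : List (List Int)) :
    (pvLq m).Pairwise (fun a b => pvKey a < pvKey b) := by
  rw [pvLq]
  refine pvPairwiseFlatMapRange _ _ ?_ ?_
  · intro i0 _
    refine pvPairwiseFlatMapRange _ _ ?_ ?_
    · intro j0 _
      rw [pvCell]
      refine pvPairwiseFlatMapRange _ _ ?_ ?_
      · intro x _
        rw [List.pairwise_map]
        have hp : ((List.range (j0+1)).filter (fun y => pvCondB m (i0+1) (j0+1) x y)).Pairwise (· < ·) :=
          List.Pairwise.sublist (List.filter_sublist) List.pairwise_lt_range
        refine hp.imp ?_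
        intro a b hab
        rw [pvKeyLt]
        right; exact ⟨rfl, Or.inr ⟨rfl, Or.inr ⟨rfl, show ((a:Nat):Int) < ((b:Nat):Int) by exact_mod_cast hab⟩⟩⟩
      · intro x x' hxx' _ a ha b hb
        simp only [List.mem_map, List.mem_filter] at ha hb
        obtain ⟨y, _, rfl⟩ := ha
        obtain ⟨y', _, rfl⟩ := hb
        rw [pvKeyLt]
        right; exact ⟨rfl, Or.inr ⟨rfl, Or.inl (show ((x:Nat):Int) < ((x':Nat):Int) by exact_mod_cast hxx')⟩⟩
    · intro j0 j0' hjj' _ a ha b hb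
      obtain ⟨xa, ya, _, _, rfl⟩ := pvCellMem m i0 j0 a ha
      obtain ⟨xb, yb, _, _, rfl⟩ := pvCellMem m i0 j0' b hb
      rw [pvKeyLt]
      right; exact ⟨rfl, Or.inl (show ((j0+1:Nat):Int) < ((j0'+1:Nat):Int) by exact_mod_cast (by omega : j0 + 1 < j0' + 1))⟩
  · intro i0 i0' hii' _ a ha b hb
    simp only [List.mem_flatMap] at ha hb
    obtain ⟨j0, _, ha⟩ := ha
    obtain ⟨j0', _, hb⟩ := hb
    obtain ⟨xa, ya, _, _, rfl⟩ := pvCellMem m i0 j0 a ha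
    obtain ⟨xb, yb, _, _, rfl⟩ := pvCellMem m i0' j0' b hb
    rw [pvKeyLt]
    left; exact (show ((i0+1:Nat):Int) < ((i0'+1:Nat):Int) by exact_mod_cast (by omega : i0 + 1 < i0' + 1))

theorem pvB_char (m : List (List Int))
    (hm : m ≠ []) (hrow : ∀ r ∈ m, (m.headD []).length ≤ r.length) :
    submatrixSum_alt m = (pvLq m).map pvFmt4 := by
  unfold submatrixSum_alt
  rw [pvHead', PySem.List.len_eq, PySem.List.len_eq]
  show (PySem.List.sorted
    ((PySem.List.pyRange 0 (m.length : Int) 1).foldl (fun (hits : List (Int × Int × Int × Int)) x =>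
      ((PySem.List.pyRange (x + 1) ((m.length : Int) + 1) 1).foldl
        (fun (st : List Int × List (Int × Int × Int × Int)) i =>
          let r := PySem.List.pyGetD m (i - 1) []
          let colsum := (PySem.List.pyRange 0 ((m.headD []).length : Int) 1).foldl
            (fun cs c => PySem.List.pySetD cs c (PySem.List.pyGetD cs c 0 + PySem.List.pyGetD r c 0)) st.1
          let pref := (PySem.List.pyRange 0 ((m.headD []).length : Int) 1).foldl
            (fun pf c => PySem.List.pySetD pf (c + 1) (PySem.List.pyGetD pf c 0 + PySem.List.pyGetD colsum c 0))
            (PySem.List.pyRepeat [0] (((m.headD []).length : Int) + 1))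
          let inner := (PySem.List.pyRange 0 (((m.headD []).length : Int) + 1) 1).foldl
            (fun (dh : PySem.Dict Int (List Int) × List (Int × Int × Int × Int)) j =>
              let p := PySem.List.pyGetD pref j 0
              (dh.1.modify p [] (fun l => l ++ [j]),
               dh.2 ++ (dh.1.getD p []).map (fun y => (i, j, x, y))))
            (PySem.Dict.empty, st.2)
          (colsum, inner.2))
        (PySem.List.pyRepeat [0] ((m.headD []).length : Int), hits)).2) [])
    (fun t => toLex (t.1, toLex (t.2.1, toLex (t.2.2.1, t.2.2.2)))) false).map
    (fun t => pvFmt t.2.2.1 t.2.2.2 (t.1 - 1) (t.2.1 - 1)) = (pvLq m).map pvFmt4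
  rw [pvB_hits m hm hrow]
  have hsorted := PySem.List.sorted_eq_of_perm_of_pairwise_lt (pvHB m) (pvLq m)
    (fun (t : Int × Int × Int × Int) => toLex (t.1, toLex (t.2.1, toLex (t.2.2.1, t.2.2.2))))
    (pvPerm m) (pvPairwise m)
  rw [hsorted]
  exact List.map_congr_left fun t _ => rfl

-- ===== VERDICT (by name: the statement is the Claim_ definition above) =====
theorem submatrixSum_spec : Claim_equal_submatrixSum := by
  intro m _ hpre
  unfold Spec_submatrixSum
  rw [pvA_char m hpre.1 hpre.2, pvB_char m hpre.1 hpre.2]
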